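-- pv_equiv track=rewrite | github.com/rzamoraw/TReDS_Version_Fintnery | services/connectors/esg_certificaciones.py | _score_unspsc
-- ===== SOURCE A (Python) =====
-- from typing import Dict, Any, List, Tuple, Optional
--
-- _UNSPSC_MINEROS = [(20100000, 20142100), (23151600, 23151699), (23153200, 23153299), (25170000, 25179999), (20122300, 20122399)]
--
-- def _score_unspsc(codes: List[str]) -> int:
--     seen=set()
--     pts=0
--     for c in set(codes or []):
--         try:
--             n=int(c)
--         except:
--             continue
--         for a,b in _UNSPSC_MINEROS:
--             if a <= n <= b and (a,b) not in seen:
--                 pts += 12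
--                 seen.add((a,b))
--                 if len(seen)>=2:  # tope dos rangos
--                     break
--     return min(24, pts)
-- ===== SOURCE B (Python) =====
-- from typing import List
--
-- _UNSPSC_MINEROS = [(20100000, 20142100), (23151600, 23151699), (23153200, 23153299), (25170000, 25179999), (20122300, 20122399)]
--
-- def _score_unspsc(codes: List[str]) -> int:
--     ns = []
--     for c in set(codes or []):
--         try:
--             ns.append(int(c))
--         except:
--             pass
--     hit = sum(1 for a, b in _UNSPSC_MINEROS if any(a <= n <= b for n in ns))
--     return min(24, 12 * hit)
-- ===== Notes on version B (the rewrite author's own statement) =====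
-- stated objective: simpler
-- what changed: B inverts the loop nesting: it parses the deduplicated codes once into a list of ints, then counts (ranges outer, any() over ints inner) how many of the five fixed ranges are hit, returning min(24, 12*count) in closed form, eliminating A's seen-set, points accumulator and early break.
import Mathlib
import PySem

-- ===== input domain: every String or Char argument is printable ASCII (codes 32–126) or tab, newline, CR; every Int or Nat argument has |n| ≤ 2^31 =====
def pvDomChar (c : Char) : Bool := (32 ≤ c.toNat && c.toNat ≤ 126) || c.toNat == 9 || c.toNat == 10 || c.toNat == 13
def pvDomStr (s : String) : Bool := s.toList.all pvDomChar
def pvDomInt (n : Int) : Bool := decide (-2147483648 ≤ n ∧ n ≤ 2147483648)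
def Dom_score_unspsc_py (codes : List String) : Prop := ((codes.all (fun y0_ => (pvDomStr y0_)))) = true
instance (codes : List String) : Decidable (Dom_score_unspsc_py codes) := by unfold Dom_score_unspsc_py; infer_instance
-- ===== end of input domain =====

-- B inverts the loop nesting: it parses the distinct codes once, counts the ranges hit, and
-- returns min(24, 12*count) in closed form — simpler (no seen-set/points accumulator/break).
-- Both results are independent of Python's set iteration order (that is what the proof shows).

-- ===== PORT A =====
def rangesMineros : List (Int × Int) :=
  [(20100000, 20142100), (23151600, 23151699), (23153200, 23153299),
   (25170000, 25179999), (20122300, 20122399)]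

-- A's inner 'for a,b in _UNSPSC_MINEROS' loop with its 'break' once len(seen) >= 2
def unspscInner (n : Int) : List (Int × Int) → PySem.Set (Int × Int) → Int →
    PySem.Set (Int × Int) × Int
  | [], seen, pts => (seen, pts)
  | r :: rest, seen, pts =>
    if r.1 ≤ n ∧ n ≤ r.2 ∧ r ∉ seen then
      let pts' := pts + 12
      let seen' := PySem.Set.add seen r
      if 2 ≤ seen'.length then (seen', pts')
      else unspscInner n rest seen' pts'
    else unspscInner n rest seen pts

def score_unspsc_py (codes : List String) : Int :=
  let st := (PySem.Set.ofList codes).foldl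
    (fun (st : PySem.Set (Int × Int) × Int) c =>
      match PySem.Int.ofStr? c with
      | none => st
      | some n => unspscInner n rangesMineros st.1 st.2)
    (PySem.Set.empty, 0)
  min 24 st.2

-- ===== PORT B =====
def score_unspsc_py_alt (codes : List String) : Int :=
  let ns := (PySem.Set.ofList codes).foldl
    (fun (acc : List Int) c =>
      match PySem.Int.ofStr? c with
      | some n => acc ++ [n]
      | none => acc)
    []
  let hit := rangesMineros.foldl
    (fun (k : Int) r =>
      if ns.any (fun n => decide (r.1 ≤ n) && decide (n ≤ r.2)) then k + 1 else k) 0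
  min 24 (12 * hit)

-- ===== PRECONDITION & SPEC =====
def Spec_score_unspsc_py (codes : List String) (out : Int) : Prop := out = score_unspsc_py_alt codes
instance (codes : List String) (out : Int) : Decidable (Spec_score_unspsc_py codes out) := by unfold Spec_score_unspsc_py; infer_instance

-- ===== CLAIM (what is proved, stated in full; the proofs are below) =====
def Claim_equal_score_unspsc_py : Prop := ∀ (codes : List String), Dom_score_unspsc_py codes → Spec_score_unspsc_py codes (score_unspsc_py codes)

-- ===== LEMMAS AND PROOFS =====

-- r is matched by the parsed integer m
def rMatch (m : Int) (r : Int × Int) : Prop := r.1 ≤ m ∧ m ≤ r.2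

-- the list of ranges hit by at least one integer of ns (B's count counts these)
def hitL (ns : List Int) : List (Int × Int) :=
  rangesMineros.filter (fun r => ns.any (fun n => decide (r.1 ≤ n) && decide (n ≤ r.2)))

lemma mem_hitL {ns : List Int} {r : Int × Int} :
    r ∈ hitL ns ↔ r ∈ rangesMineros ∧ ∃ m ∈ ns, rMatch m r := by
  simp [hitL, List.mem_filter, rMatch]

lemma nodup_hitL (ns : List Int) : (hitL ns).Nodup :=
  (by decide : rangesMineros.Nodup).filter _

lemma length_le_of_nodup_subset {l m : List (Int × Int)} (h : l.Nodup) (hs : l ⊆ m) :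
    l.length ≤ m.length := by
  classical
  calc l.length = l.toFinset.card := (List.toFinset_card_of_nodup h).symm
    _ ≤ m.toFinset.card := Finset.card_le_card (by intro x hx; simp at hx ⊢; exact hs hx)
    _ ≤ m.length := m.toFinset_card_le

-- invariant carried by A's outer loop: pts counts 12 per element of seen, every element of seen
-- is a range hit by an already-parsed integer, and unless two ranges were already collected,
-- seen contains EVERY range hit so far
def InvA (seen : PySem.Set (Int × Int)) (pts : Int) (ns : List Int) : Prop :=
  seen.Nodup ∧ pts = 12 * (seen.length : Int) ∧
  (∀ r ∈ seen, r ∈ rangesMineros ∧ ∃ m ∈ ns, rMatch m r) ∧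
  (2 ≤ seen.length ∨ ∀ r ∈ rangesMineros, (∃ m ∈ ns, rMatch m r) → r ∈ seen)

lemma inner_spec (n : Int) : ∀ (rs : List (Int × Int)) (seen : PySem.Set (Int × Int)) (pts : Int),
    seen.Nodup → pts = 12 * (seen.length : Int) →
    (unspscInner n rs seen pts).1.Nodup ∧
    (unspscInner n rs seen pts).2 = 12 * (((unspscInner n rs seen pts).1.length : Int)) ∧
    (∀ r ∈ (unspscInner n rs seen pts).1, r ∈ seen ∨ (r ∈ rs ∧ rMatch n r)) ∧
    (∀ r ∈ seen, r ∈ (unspscInner n rs seen pts).1) ∧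
    (2 ≤ (unspscInner n rs seen pts).1.length ∨
      ∀ r ∈ rs, rMatch n r → r ∈ (unspscInner n rs seen pts).1) := by
  intro rs
  induction rs with
  | nil =>
    intro seen pts hnd hpts
    refine ⟨hnd, hpts, ?_, ?_, Or.inr ?_⟩ <;> simp [unspscInner]
  | cons r rest ih =>
    intro seen pts hnd hpts
    by_cases hc : r.1 ≤ n ∧ n ≤ r.2 ∧ r ∉ seen
    · have hrm : rMatch n r := ⟨hc.1, hc.2.1⟩
      have hnm : r ∉ seen := hc.2.2
      have hadd : PySem.Set.add seen r = seen ++ [r] := PySem.Set.add_of_not_mem hnm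
      have hnd' : (PySem.Set.add seen r).Nodup := PySem.Set.nodup_add seen r hnd
      have hlen : (PySem.Set.add seen r).length = seen.length + 1 := by
        rw [hadd]; simp
      have hpts' : pts + 12 = 12 * (((PySem.Set.add seen r).length : Int)) := by
        rw [hlen]; push_cast; omega
      have hmem : ∀ x, x ∈ PySem.Set.add seen r ↔ x ∈ seen ∨ x = r := by
        intro x; exact PySem.Set.mem_add (s := seen) (x := r) (y := x)
      by_cases h2 : 2 ≤ (PySem.Set.add seen r).length
      · have hred : unspscInner n (r :: rest) seen pts = (PySem.Set.add seen r, pts + 12) := by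
          simp only [unspscInner, if_pos hc, if_pos h2]
        rw [hred]
        refine ⟨hnd', hpts', ?_, ?_, Or.inl h2⟩
        · intro x hx
          rcases (hmem x).1 hx with h | h
          · exact Or.inl h
          · exact Or.inr ⟨by simp [h], h ▸ hrm⟩
        · intro x hx; exact (hmem x).2 (Or.inl hx)
      · have hred : unspscInner n (r :: rest) seen pts
            = unspscInner n rest (PySem.Set.add seen r) (pts + 12) := by
          simp only [unspscInner, if_pos hc, if_neg h2]
        rw [hred]
        obtain ⟨i1, i2, i3, i4, i5⟩ := ih (PySem.Set.add seen r) (pts + 12) hnd' hpts'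
        refine ⟨i1, i2, ?_, ?_, ?_⟩
        · intro x hx
          rcases i3 x hx with h | h
          · rcases (hmem x).1 h with h' | h'
            · exact Or.inl h'
            · exact Or.inr ⟨by simp [h'], h' ▸ hrm⟩
          · exact Or.inr ⟨List.mem_cons_of_mem _ h.1, h.2⟩
        · intro x hx; exact i4 x ((hmem x).2 (Or.inl hx))
        · rcases i5 with h | h
          · exact Or.inl h
          · refine Or.inr ?_
            intro x hx hm
            rcases List.mem_cons.1 hx with h' | h'
            · exact h' ▸ i4 r ((hmem r).2 (Or.inr rfl))
            · exact h x h' hm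
    · have hred : unspscInner n (r :: rest) seen pts = unspscInner n rest seen pts := by
        simp only [unspscInner, if_neg hc]
      rw [hred]
      obtain ⟨i1, i2, i3, i4, i5⟩ := ih seen pts hnd hpts
      refine ⟨i1, i2, ?_, i4, ?_⟩
      · intro x hx
        rcases i3 x hx with h | h
        · exact Or.inl h
        · exact Or.inr ⟨List.mem_cons_of_mem _ h.1, h.2⟩
      · rcases i5 with h | h
        · exact Or.inl h
        · refine Or.inr ?_
          intro x hx hm
          rcases List.mem_cons.1 hx with h' | h'
          · subst h'
            have hin : x ∈ seen := by
              by_contra hni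
              exact hc ⟨hm.1, hm.2, hni⟩
            exact i4 x hin
          · exact h x h' hm

-- A's outer loop (the fold in score_unspsc_py)
def stepA (st : PySem.Set (Int × Int) × Int) (c : String) : PySem.Set (Int × Int) × Int :=
  match PySem.Int.ofStr? c with
  | none => st
  | some n => unspscInner n rangesMineros st.1 st.2

lemma foldA_inv : ∀ (ds : List String) (seen : PySem.Set (Int × Int)) (pts : Int) (ns0 : List Int),
    InvA seen pts ns0 →
    InvA (ds.foldl stepA (seen, pts)).1 (ds.foldl stepA (seen, pts)).2
      (ns0 ++ ds.filterMap PySem.Int.ofStr?) := by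
  intro ds
  induction ds with
  | nil => intro seen pts ns0 h; simpa using h
  | cons c ds' ih =>
    intro seen pts ns0 h
    obtain ⟨h1, h2, h3, h4⟩ := h
    rcases hp : PySem.Int.ofStr? c with _ | n
    · have : stepA (seen, pts) c = (seen, pts) := by simp [stepA, hp]
      simpa [List.foldl_cons, this, List.filterMap_cons, hp] using
        ih seen pts ns0 ⟨h1, h2, h3, h4⟩
    · have hstep : stepA (seen, pts) c = unspscInner n rangesMineros seen pts := by
        simp [stepA, hp]
      obtain ⟨i1, i2, i3, i4, i5⟩ := inner_spec n rangesMineros seen pts h1 h2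
      have hinv : InvA (unspscInner n rangesMineros seen pts).1
          (unspscInner n rangesMineros seen pts).2 (ns0 ++ [n]) := by
        refine ⟨i1, i2, ?_, ?_⟩
        · intro r hr
          rcases i3 r hr with hS | hR
          · obtain ⟨hrg, m, hm, hmm⟩ := h3 r hS
            exact ⟨hrg, m, by simp [hm], hmm⟩
          · exact ⟨hR.1, n, by simp, hR.2⟩
        · rcases i5 with h' | h'
          · exact Or.inl h'
          · rcases h4 with h'' | h''
            · exact Or.inl (le_trans h'' (length_le_of_nodup_subset h1 (fun x hx => i4 x hx)))
            · refine Or.inr ?_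
              intro r hrg hm
              obtain ⟨m, hmns, hmm⟩ := hm
              rcases List.mem_append.1 hmns with hm0 | hm1
              · exact i4 r (h'' r hrg ⟨m, hm0, hmm⟩)
              · have : m = n := by simpa using hm1
                exact h' r hrg (this ▸ hmm)
      have := ih _ _ (ns0 ++ [n]) hinv
      simpa [List.foldl_cons, hstep, List.filterMap_cons, hp, List.append_assoc] using this

lemma foldB_eq : ∀ (ds : List String) (acc : List Int),
    ds.foldl (fun (acc : List Int) c =>
      match PySem.Int.ofStr? c with
      | some n => acc ++ [n]
      | none => acc) acc = acc ++ ds.filterMap PySem.Int.ofStr? := by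
  intro ds
  induction ds with
  | nil => intro acc; simp
  | cons c ds' ih =>
    intro acc
    rcases hp : PySem.Int.ofStr? c with _ | n <;>
      simp [List.foldl_cons, hp, ih, List.append_assoc]

lemma alt_eq (codes : List String) :
    score_unspsc_py_alt codes
      = min 24 (12 * ((hitL ((PySem.Set.ofList codes).filterMap PySem.Int.ofStr?)).length : Int)) := by
  show min (24 : Int) (12 * (rangesMineros.foldl
      (fun (k : Int) r =>
        if ((PySem.Set.ofList codes).foldl
            (fun (acc : List Int) c =>
              match PySem.Int.ofStr? c with
              | some n => acc ++ [n]
              | none => acc) []).any (fun n => decide (r.1 ≤ n) && decide (n ≤ r.2))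
        then k + 1 else k) 0)) = _
  rw [foldB_eq, List.nil_append]
  rw [PySem.List.foldl_count_if]
  simp [hitL, List.countP_eq_length_filter]

-- ===== VERDICT (by name: the statement is the Claim_ definition above) =====
theorem score_unspsc_py_spec : Claim_equal_score_unspsc_py := by
  intro codes _
  unfold Spec_score_unspsc_py
  rw [alt_eq]
  set ds := PySem.Set.ofList codes with hds
  set ns := ds.filterMap PySem.Int.ofStr? with hns
  have hinit : InvA PySem.Set.empty 0 [] := by
    refine ⟨List.nodup_nil, by simp [PySem.Set.empty], ?_, Or.inr ?_⟩
    · intro r hr; simp [PySem.Set.empty] at hr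
    · intro r _ hm; simp at hm
  have hinv := foldA_inv ds PySem.Set.empty 0 [] hinit
  rw [List.nil_append] at hinv
  obtain ⟨h1, h2, h3, h4⟩ := hinv
  have hA : score_unspsc_py codes = min 24 (ds.foldl stepA (PySem.Set.empty, 0)).2 := rfl
  rw [hA, h2]
  have hsub : ∀ r ∈ (ds.foldl stepA (PySem.Set.empty, 0)).1, r ∈ hitL ns := by
    intro r hr
    exact mem_hitL.2 (h3 r hr)
  have hle : (ds.foldl stepA (PySem.Set.empty, 0)).1.length ≤ (hitL ns).length :=
    length_le_of_nodup_subset h1 hsub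
  rcases h4 with h | h
  · omega
  · have hsub' : ∀ r ∈ hitL ns, r ∈ (ds.foldl stepA (PySem.Set.empty, 0)).1 := by
      intro r hr
      obtain ⟨hrg, hm⟩ := mem_hitL.1 hr
      exact h r hrg hm
    have hge : (hitL ns).length ≤ (ds.foldl stepA (PySem.Set.empty, 0)).1.length :=
      length_le_of_nodup_subset (nodup_hitL ns) hsub'
    omega
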